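-- pv_equiv track=rewrite | github.com/kaltwang/latenttrees | misc/read_references/read_references.py | process_concat
-- ===== SOURCE A (Python) =====
-- def check_elem(elem):
--     if elem[0] == '\\item':
--         return (True, False)
--     elif elem[0] == '\\selectlanguage':
--         return (True, True)
--     elif elem[-1] == '\\textcolor':
--         return (True, True)
--     elif elem[-1] == '\\foreignlanguage':
--         return(True, True)
--     elif elem[0] == '\\rmfamily\\color':
--         return (True, True)
--
--     # return skip_this, skip_next
--     return (False, False)
--
-- def process_concat(concat):
--     result = []
--     skip_next = False
--     for elem in concat:
--         if not skip_next:
--             skip_this, skip_next = check_elem(elem)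
--             if not skip_this:
--                 result.append(elem)
--         else:
--             skip_next = False
--     return result
-- ===== SOURCE B (Python) =====
-- def check_elem(elem):
--     if elem[0] == '\\item':
--         return (True, False)
--     elif elem[0] == '\\selectlanguage':
--         return (True, True)
--     elif elem[-1] == '\\textcolor':
--         return (True, True)
--     elif elem[-1] == '\\foreignlanguage':
--         return(True, True)
--     elif elem[0] == '\\rmfamily\\color':
--         return (True, True)
--     return (False, False)
--
-- def process_concat(concat):
--     # staged passes: (1) classify every element, (2) scan the skip_next flags
--     # into a per-position "skipped" table, (3) filter by zipping the tables
--     flags = [check_elem(e) for e in concat]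
--     skipped = []
--     prev = False
--     for _, skip_next in flags:
--         skipped.append(prev)
--         prev = skip_next and not prev
--     return [e for e, (skip_this, _), sk in zip(concat, flags, skipped)
--             if not sk and not skip_this]
-- ===== Notes on version B (the rewrite author's own statement) =====
-- stated objective: alternative
-- what changed: Replaces A's single stateful pass with three staged passes: classify every element up front into a flags table, scan the skip_next flags into a per-position skipped table, then filter by zipping the three tables.
-- outside the precondition, e.g. on process_concat([['\\selectlanguage'], []]): A returns [], B raises IndexError
import Mathlib
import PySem

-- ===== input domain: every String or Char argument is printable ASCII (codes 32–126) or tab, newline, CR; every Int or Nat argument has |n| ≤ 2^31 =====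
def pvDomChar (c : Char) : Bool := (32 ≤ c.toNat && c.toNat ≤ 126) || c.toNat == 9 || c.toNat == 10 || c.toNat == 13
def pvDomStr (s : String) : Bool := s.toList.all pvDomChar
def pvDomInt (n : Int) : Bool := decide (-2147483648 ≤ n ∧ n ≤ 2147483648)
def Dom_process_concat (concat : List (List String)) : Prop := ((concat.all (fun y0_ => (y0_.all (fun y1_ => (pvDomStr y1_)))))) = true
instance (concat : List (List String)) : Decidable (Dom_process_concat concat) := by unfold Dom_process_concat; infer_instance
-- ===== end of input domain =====

-- B replaces A's single stateful pass by three staged passes (classify all elements,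
-- scan the skip_next flags into a skipped table, filter by zipping); alternative, same cost.

-- ===== PORT A =====
-- check_elem: elem[0] / elem[-1] via PySem.List.pyGet?; on [] Python raises IndexError
-- (excluded by Pre_), the port falls through to (false, false) there.
def check_elem (elem : List String) : Bool × Bool :=
  if PySem.List.pyGet? elem 0 = some "\\item" then (true, false)
  else if PySem.List.pyGet? elem 0 = some "\\selectlanguage" then (true, true)
  else if PySem.List.pyGet? elem (-1) = some "\\textcolor" then (true, true)
  else if PySem.List.pyGet? elem (-1) = some "\\foreignlanguage" then (true, true)
  else if PySem.List.pyGet? elem 0 = some "\\rmfamily\\color" then (true, true)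
  else (false, false)

def process_concat (concat : List (List String)) : List (List String) :=
  (concat.foldl
    (fun (acc : List (List String) × Bool) elem =>
      if !acc.2 then
        (if !(check_elem elem).1 then acc.1 ++ [elem] else acc.1, (check_elem elem).2)
      else (acc.1, false))
    ([], false)).1

-- ===== PORT B =====
-- pass 1: flags table
def pcFlags (concat : List (List String)) : List (Bool × Bool) := concat.map check_elem
-- pass 2: the for-loop building `skipped` (state = (skipped so far, prev))
def pcSkipped (flags : List (Bool × Bool)) : List Bool :=
  (flags.foldl (fun (acc : List Bool × Bool) f => (acc.1 ++ [acc.2], f.2 && !acc.2))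
    ([], false)).1
-- pass 3: the filtering comprehension over zip(concat, flags, skipped)
def process_concat_alt (concat : List (List String)) : List (List String) :=
  (concat.zip ((pcFlags concat).zip (pcSkipped (pcFlags concat)))).filterMap
    (fun x => if !x.2.2 && !x.2.1.1 then some x.1 else none)

-- ===== PRECONDITION & SPEC =====
-- Pre_ excludes inputs containing an empty inner list: Python's check_elem raises
-- IndexError on [], so A raises unless the [] sits in a skipped-over position,
-- where A still returns but B (which classifies every element up front) raises (see cites).
def Pre_process_concat (concat : List (List String)) : Prop :=
  ∀ e ∈ concat, e ≠ []
instance (concat : List (List String)) : Decidable (Pre_process_concat concat) := by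
  unfold Pre_process_concat; infer_instance

def pvWitness_process_concat : List (List String) :=
  [["\\item"], ["hello", "world"], ["\\selectlanguage", "x"], ["skipped"], ["keep"]]

def Spec_process_concat (concat : List (List String)) (out : List (List String)) : Prop := out = process_concat_alt concat
instance (concat : List (List String)) (out : List (List String)) : Decidable (Spec_process_concat concat out) := by unfold Spec_process_concat; infer_instance

-- ===== CLAIM (what is proved, stated in full; the proofs are below) =====
def Claim_equal_process_concat : Prop := ∀ (concat : List (List String)), Dom_process_concat concat → Pre_process_concat concat → Spec_process_concat concat (process_concat concat)

-- ===== LEMMAS AND PROOFS =====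

-- structural characterisation of the filtered list, proof-side only
def goL : List (List String) → List (List String)
  | [] => []
  | e :: r =>
    (if (check_elem e).1 then [] else [e]) ++ goL (if (check_elem e).2 then r.tail else r)
termination_by l => l.length
decreasing_by split <;> simp [List.length_tail] <;> try omega

theorem foldA (n : Nat) :
    ∀ (l : List (List String)) (acc : List (List String)), l.length ≤ n →
      (l.foldl
        (fun (acc : List (List String) × Bool) elem =>
          if !acc.2 then
            (if !(check_elem elem).1 then acc.1 ++ [elem] else acc.1, (check_elem elem).2)
          else (acc.1, false))
        (acc, false)).1 = acc ++ goL l := by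
  induction n with
  | zero =>
    intro l acc h
    have : l = [] := List.length_eq_zero_iff.mp (Nat.le_zero.mp h)
    subst this; simp [goL]
  | succ n ih =>
    intro l acc h
    match l with
    | [] => simp [goL]
    | e :: r =>
      simp only [List.foldl_cons, goL]
      rcases hc : check_elem e with ⟨st, sn⟩
      have hr : r.length ≤ n := by simpa using Nat.lt_succ_iff.mp (by simpa using h)
      cases sn with
      | false =>
        cases st with
        | false =>
          simp only [hc, Bool.not_false, Bool.not_true, Bool.false_eq_true, reduceIte]
          rw [ih r (acc ++ [e]) hr]; simp
        | true =>
          simp only [hc, Bool.not_false, Bool.not_true, Bool.false_eq_true, reduceIte]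
          rw [ih r acc hr]; simp
      | true =>
        match r with
        | [] => cases st <;> simp [goL]
        | x :: r' =>
          have hr' : r'.length ≤ n := by simp at h; omega
          cases st with
          | false =>
            simp only [hc, Bool.not_false, Bool.not_true, Bool.false_eq_true, reduceIte,
              List.foldl_cons, List.tail_cons]
            rw [ih r' (acc ++ [e]) hr']; simp
          | true =>
            simp only [hc, Bool.not_false, Bool.not_true, Bool.false_eq_true, reduceIte,
              List.foldl_cons, List.tail_cons]
            rw [ih r' acc hr']; simp

-- simple recursive form of the `skipped` scan
def skippedGo : List (Bool × Bool) → Bool → List Bool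
  | [], _ => []
  | f :: fs, prev => prev :: skippedGo fs (f.2 && !prev)

theorem foldSkip (flags : List (Bool × Bool)) :
    ∀ (acc : List Bool) (prev : Bool),
      (flags.foldl (fun (acc : List Bool × Bool) f => (acc.1 ++ [acc.2], f.2 && !acc.2))
        (acc, prev)).1 = acc ++ skippedGo flags prev := by
  induction flags with
  | nil => intro acc prev; simp [skippedGo]
  | cons f fs ih =>
    intro acc prev
    simp only [List.foldl_cons, skippedGo]
    rw [ih]; simp

-- B with the carry threaded directly through the recursion
def bGo : List (List String) → Bool → List (List String)
  | [], _ => []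
  | e :: r, prev =>
    (if !prev && !(check_elem e).1 then [e] else []) ++ bGo r ((check_elem e).2 && !prev)

theorem altZip (l : List (List String)) :
    ∀ (prev : Bool),
      (l.zip ((l.map check_elem).zip (skippedGo (l.map check_elem) prev))).filterMap
        (fun x => if !x.2.2 && !x.2.1.1 then some x.1 else none) = bGo l prev := by
  induction l with
  | nil => intro prev; simp [bGo]
  | cons e r ih =>
    intro prev
    simp only [List.map_cons, skippedGo, List.zip_cons_cons, List.filterMap_cons, bGo]
    rw [ih]
    by_cases h : (!prev && !(check_elem e).1) = true <;> simp [h, Bool.and_comm]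

theorem bGo_goL (n : Nat) :
    ∀ (l : List (List String)), l.length ≤ n → bGo l false = goL l := by
  induction n with
  | zero =>
    intro l h
    have : l = [] := List.length_eq_zero_iff.mp (Nat.le_zero.mp h)
    subst this; simp [bGo, goL]
  | succ n ih =>
    intro l h
    match l with
    | [] => simp [bGo, goL]
    | e :: r =>
      have hr : r.length ≤ n := by simpa using Nat.lt_succ_iff.mp (by simpa using h)
      simp only [bGo, goL, Bool.not_false, Bool.true_and, Bool.and_true]
      rcases hc : check_elem e with ⟨st, sn⟩
      cases sn with
      | false =>
        simp only
        rw [ih r hr]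
        cases st <;> simp
      | true =>
        simp only
        match r with
        | [] => cases st <;> simp [bGo, goL]
        | x :: r' =>
          have hr' : r'.length ≤ n := by simp at h; omega
          simp only [bGo, Bool.not_true, Bool.and_false, Bool.false_and, List.tail_cons,
            reduceIte, List.nil_append]
          rw [ih r' hr']
          cases st <;> simp

-- ===== VERDICT (by name: the statement is the Claim_ definition above) =====
theorem process_concat_spec : Claim_equal_process_concat := by
  intro concat _ _
  unfold Spec_process_concat process_concat process_concat_alt pcFlags pcSkipped
  rw [foldA concat.length concat [] (le_refl _), foldSkip]
  simp only [List.nil_append]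
  rw [altZip, bGo_goL concat.length concat (le_refl _)]
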